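-- pv_equiv track=rewrite | github.com/RamseySystems/scnenario-tool-GCP | functions.py | sort_paths
-- ===== SOURCE A (Python) =====
-- def sort_paths(start_paths: list):
--     '''
--     A function that sorts the paths in a path list by their first index
--
--     :param start_paths: the unformatted paths
--     :return: :list:
--     '''
--     sorted = []
--     for path in start_paths:
--         if not sorted:
--             sorted.append([path])
--         else:
--             found = False
--             for lists in sorted:
--                 key = lists[0][0]
--                 if path[0] == key:
--                     lists.append(path)
--                     found = True
--                     break
--             if not found:
--                 sorted.append([path])
--     return sorted
-- ===== SOURCE B (Python) =====
-- def sort_paths(start_paths: list):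
--     keys = []
--     for path in start_paths:
--         if path[0] not in keys:
--             keys.append(path[0])
--     return [[p for p in start_paths if p[0] == k] for k in keys]
-- ===== Notes on version B (the rewrite author's own statement) =====
-- stated objective: simpler
-- what changed: A's single online loop that linearly searches and mutates the growing group list is replaced by a two-phase decomposition: first collect the distinct first elements in order of first appearance, then produce each group by filtering the whole input once per key.
-- outside the precondition, e.g. on sort_paths([[]]): A returns [[[]]], B raises IndexError
import Mathlib
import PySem

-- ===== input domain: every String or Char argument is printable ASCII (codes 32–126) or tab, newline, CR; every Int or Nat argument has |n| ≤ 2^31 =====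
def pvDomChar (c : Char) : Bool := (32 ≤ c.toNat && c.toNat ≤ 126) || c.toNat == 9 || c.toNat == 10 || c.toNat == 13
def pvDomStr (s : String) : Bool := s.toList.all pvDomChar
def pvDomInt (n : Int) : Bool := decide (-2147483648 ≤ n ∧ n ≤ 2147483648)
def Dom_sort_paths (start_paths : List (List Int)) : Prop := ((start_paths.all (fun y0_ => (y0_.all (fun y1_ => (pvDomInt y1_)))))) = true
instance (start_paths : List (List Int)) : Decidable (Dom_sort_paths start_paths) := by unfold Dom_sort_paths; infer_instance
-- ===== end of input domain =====

-- B replaces A's online accumulate-and-search loop with a simpler two-phase decomposition: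
-- collect the distinct first elements in order of first appearance, then build each group
-- by filtering the input once per key.


-- ===== PORT A =====
-- the inner 'for lists in sorted' loop with its found flag: append path to the first group
-- whose lists[0][0] equals path[0] and stop, else (found stayed False) append a new group [path].
-- path[0] / lists[0][0] are transcribed as .headD: exact here since Pre_ guarantees every
-- path is nonempty and every group is nonempty by construction.
def sortPathsLoop (path : List Int) : List (List (List Int)) → List (List (List Int))
  | [] => [[path]]
  | g :: gs =>
      if path.headD 0 = (g.headD []).headD 0 then (g ++ [path]) :: gs
      else g :: sortPathsLoop path gs

def sort_paths (start_paths : List (List Int)) : List (List (List Int)) :=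
  start_paths.foldl (fun acc path => if acc = [] then acc ++ [[path]] else sortPathsLoop path acc) []

-- ===== PORT B =====
-- phase 1: the fold builds the list of distinct first elements in first-appearance order
-- ('if path[0] not in keys: keys.append(path[0])'); phase 2: one filter of the input per key.
def sort_paths_alt (start_paths : List (List Int)) : List (List (List Int)) :=
  (start_paths.foldl (fun ks p => if p.headD 0 ∈ ks then ks else ks ++ [p.headD 0]) []).map
    (fun k => start_paths.filter (fun p => p.headD 0 = k))

-- ===== PRECONDITION & SPEC =====
-- Pre_ excludes inputs containing an empty path: there path[0] raises IndexError in both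
-- programs, except for the degenerate one-element input whose only path is empty, where A
-- returns without ever indexing but B still raises (see cites).
def Pre_sort_paths (start_paths : List (List Int)) : Prop :=
  ∀ p ∈ start_paths, p ≠ []
instance (start_paths : List (List Int)) : Decidable (Pre_sort_paths start_paths) := by unfold Pre_sort_paths; infer_instance

def pvWitness_sort_paths : List (List Int) := [[1, 2], [3], [1], [3, 9], [2]]

def Spec_sort_paths (start_paths : List (List Int)) (out : List (List (List Int))) : Prop := out = sort_paths_alt start_paths
instance (start_paths : List (List Int)) (out : List (List (List Int))) : Decidable (Spec_sort_paths start_paths out) := by unfold Spec_sort_paths; infer_instance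

-- ===== CLAIM (what is proved, stated in full; the proofs are below) =====
def Claim_equal_sort_paths : Prop := ∀ (start_paths : List (List Int)), Dom_sort_paths start_paths → Pre_sort_paths start_paths → Spec_sort_paths start_paths (sort_paths start_paths)

-- ===== LEMMAS AND PROOFS =====

-- B's first phase as a named function
def pvDK (xs : List (List Int)) : List Int :=
  xs.foldl (fun ks p => if p.headD 0 ∈ ks then ks else ks ++ [p.headD 0]) []

-- B's result as a function of the prefix consumed so far
def pvF (xs : List (List Int)) : List (List (List Int)) :=
  (pvDK xs).map (fun k => xs.filter (fun p => p.headD 0 = k))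

lemma pvDK_step (xs : List (List Int)) (p : List Int) :
    pvDK (xs ++ [p]) = if p.headD 0 ∈ pvDK xs then pvDK xs else pvDK xs ++ [p.headD 0] := by
  simp [pvDK, List.foldl_append]

lemma mem_foldl_dk (xs : List (List Int)) :
    ∀ (ks : List Int) (k : Int),
      k ∈ xs.foldl (fun ks p => if p.headD 0 ∈ ks then ks else ks ++ [p.headD 0]) ks ↔
        k ∈ ks ∨ ∃ p ∈ xs, p.headD 0 = k := by
  induction xs with
  | nil => simp
  | cons q xs ih =>
      intro ks k
      simp only [List.foldl_cons, ih]
      by_cases h : q.headD 0 ∈ ks <;> simp only [if_pos, h] <;> aesop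

lemma mem_pvDK (xs : List (List Int)) (k : Int) :
    k ∈ pvDK xs ↔ ∃ p ∈ xs, p.headD 0 = k := by
  rw [pvDK, mem_foldl_dk]
  simp

lemma nodup_foldl_dk (xs : List (List Int)) :
    ∀ ks : List Int, ks.Nodup →
      (xs.foldl (fun ks p => if p.headD 0 ∈ ks then ks else ks ++ [p.headD 0]) ks).Nodup := by
  induction xs with
  | nil => intro ks hks; simpa using hks
  | cons q xs ih =>
      intro ks hks
      simp only [List.foldl_cons]
      by_cases h : q.headD 0 ∈ ks
      · rw [if_pos h]; exact ih ks hks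
      · rw [if_neg h]
        refine ih _ ?_
        rw [List.nodup_append]
        exact ⟨hks, List.nodup_singleton _, by
          intro a ha b hb
          rintro rfl
          simp at hb
          have hmem : a ∈ ks := ha
          rw [hb] at hmem
          simp only [List.headD_eq_head?_getD] at h
          exact h hmem⟩

lemma nodup_pvDK (xs : List (List Int)) : (pvDK xs).Nodup :=
  nodup_foldl_dk xs [] List.nodup_nil

-- the head of a nonempty filter satisfies the predicate
lemma headD_filter_key (xs : List (List Int)) (k : Int)
    (h : ∃ p ∈ xs, p.headD 0 = k) :
    ((xs.filter (fun p => p.headD 0 = k)).headD []).headD 0 = k := by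
  rcases h with ⟨q, hq, hqk⟩
  have hne : xs.filter (fun p : List Int => p.headD 0 = k) ≠ [] := by
    intro hnil
    have hqf : q ∈ xs.filter (fun p : List Int => p.headD 0 = k) := by
      rw [List.mem_filter]
      exact ⟨hq, by simpa using hqk⟩
    rw [hnil] at hqf
    simp at hqf
  match hmatch : xs.filter (fun p : List Int => p.headD 0 = k) with
  | [] => exact absurd hmatch hne
  | a :: t =>
      have ha : a ∈ xs.filter (fun p : List Int => p.headD 0 = k) := by rw [hmatch]; simp
      have := (List.mem_filter.mp ha).2
      simpa using this

-- the inner loop on a list of groups indexed by distinct keys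
lemma sortPathsLoop_map (p : List Int) (G : Int → List (List Int)) :
    ∀ keys : List Int, keys.Nodup → (∀ k ∈ keys, ((G k).headD []).headD 0 = k) →
      sortPathsLoop p (keys.map G) =
        if p.headD 0 ∈ keys then
          keys.map (fun k => if k = p.headD 0 then G k ++ [p] else G k)
        else keys.map G ++ [[p]] := by
  intro keys
  induction keys with
  | nil => simp [sortPathsLoop]
  | cons k ks ih =>
      intro hnd hhd
      have hk : ((G k).headD []).headD 0 = k := hhd k (by simp)
      by_cases hpk : p.headD 0 = k
      · have hnotin : p.headD 0 ∉ ks := by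
          rw [hpk]; exact (List.nodup_cons.mp hnd).1
        have hmapeq : ks.map (fun k' => if k' = p.headD 0 then G k' ++ [p] else G k') = ks.map G := by
          apply List.map_congr_left
          intro k' hk'
          have hne : ¬ k' = p.headD 0 := by rintro rfl; exact hnotin hk'
          rw [if_neg hne]
        rw [List.map_cons, sortPathsLoop, if_pos (by rw [hk, hpk]),
          if_pos (List.mem_cons.mpr (Or.inl hpk)), List.map_cons, if_pos hpk.symm, hmapeq]
      · have hrec := ih (List.nodup_cons.mp hnd).2 (fun k' hk' => hhd k' (by simp [hk']))
        rw [List.map_cons, sortPathsLoop, if_neg (by rw [hk]; exact hpk), hrec]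
        by_cases hin : p.headD 0 ∈ ks
        · rw [if_pos hin, if_pos (List.mem_cons.mpr (Or.inr hin)), List.map_cons,
            if_neg (by simp only [List.headD_eq_head?_getD] at hpk ⊢; exact fun h => hpk h.symm)]
        · rw [if_neg hin, if_neg (fun h => (List.mem_cons.mp h).elim hpk hin)]
          simp

-- one step of A's fold maps pvF pref to pvF (pref ++ [p])
lemma pvF_step (pref : List (List Int)) (p : List Int) :
    sortPathsLoop p (pvF pref) = pvF (pref ++ [p]) := by
  have hhd : ∀ k ∈ pvDK pref, (((pref.filter (fun q => q.headD 0 = k)).headD []).headD 0) = k := by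
    intro k hk
    exact headD_filter_key pref k ((mem_pvDK pref k).mp hk)
  have hloop := sortPathsLoop_map p (fun k => pref.filter (fun q => q.headD 0 = k))
    (pvDK pref) (nodup_pvDK pref) hhd
  by_cases hin : p.headD 0 ∈ pvDK pref
  · rw [pvF, hloop, if_pos hin]
    rw [pvF, pvDK_step, if_pos hin]
    apply List.map_congr_left
    intro k hk
    by_cases hkp : k = p.headD 0
    · rw [if_pos hkp, List.filter_append]
      simp [hkp]
    · rw [if_neg hkp, List.filter_append]
      have hne : ¬ (p.head?.getD 0 = k) := by
        simp only [List.headD_eq_head?_getD] at hkp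
        exact fun h => hkp h.symm
      simp [hne]
  · rw [pvF, hloop, if_neg hin]
    rw [pvF, pvDK_step, if_neg hin, List.map_append]
    congr 1
    · apply List.map_congr_left
      intro k hk
      rw [List.filter_append]
      have hne : ¬ (p.head?.getD 0 = k) := by
        intro h
        apply hin
        simp only [List.headD_eq_head?_getD]
        rw [h]
        exact hk
      simp [hne]
    · have hfilt : pref.filter (fun q : List Int => q.headD 0 = p.headD 0) = [] := by
        rw [List.filter_eq_nil_iff]
        intro q hq
        simp only [decide_eq_true_eq]
        intro hqk
        exact hin ((mem_pvDK pref (p.headD 0)).mpr ⟨q, hq, hqk⟩)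
      rw [List.map_cons, List.map_nil, List.filter_append, hfilt]
      simp

-- A's fold step equals the inner loop unconditionally (the 'if not sorted' branch coincides)
lemma step_eq_loop (acc : List (List (List Int))) (p : List Int) :
    (if acc = [] then acc ++ [[p]] else sortPathsLoop p acc) = sortPathsLoop p acc := by
  cases acc <;> simp [sortPathsLoop]

lemma foldl_pvF (rest : List (List Int)) :
    ∀ pref : List (List Int),
      rest.foldl (fun acc path => if acc = [] then acc ++ [[path]] else sortPathsLoop path acc) (pvF pref)
        = pvF (pref ++ rest) := by
  induction rest with
  | nil => simp
  | cons p rest ih =>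
      intro pref
      rw [List.foldl_cons, step_eq_loop, pvF_step]
      have h := ih (pref ++ [p])
      rw [h, List.append_assoc]
      rfl

-- ===== VERDICT (by name: the statement is the Claim_ definition above) =====
theorem sort_paths_spec : Claim_equal_sort_paths := by
  intro xs _ _
  show sort_paths xs = sort_paths_alt xs
  have h := foldl_pvF xs []
  simp only [List.nil_append] at h
  have hF0 : pvF [] = [] := by simp [pvF, pvDK]
  calc sort_paths xs
      = xs.foldl (fun acc path => if acc = [] then acc ++ [[path]] else sortPathsLoop path acc) (pvF []) := by
        rw [hF0]; rfl
    _ = pvF xs := h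
    _ = sort_paths_alt xs := rfl
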